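-- pv_equiv track=rewrite | github.com/jillacinth/CS370-Final-Project | helloworld_project.py | search_higher
-- ===== SOURCE A (Python) =====
-- def search_higher(list, num):
--     highest_diff = 0
--     best_index = 0
--     for x in list:
--         if (x - num) > highest_diff:
--             highest_diff = x - num
--             best_index =  list.index(x)
--
--     return best_index
-- ===== SOURCE B (Python) =====
-- def search_higher(list, num):
--     if not list:
--         return 0
--     m = max(list)
--     return list.index(m) if m - num > 0 else 0
-- ===== Notes on version B (the rewrite author's own statement) =====
-- stated objective: idiomatic
-- what changed: Replaces the running-best accumulator scan (with a quadratic list.index inside the loop) by a global max() followed by one list.index lookup of the max value.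
import Mathlib
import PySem

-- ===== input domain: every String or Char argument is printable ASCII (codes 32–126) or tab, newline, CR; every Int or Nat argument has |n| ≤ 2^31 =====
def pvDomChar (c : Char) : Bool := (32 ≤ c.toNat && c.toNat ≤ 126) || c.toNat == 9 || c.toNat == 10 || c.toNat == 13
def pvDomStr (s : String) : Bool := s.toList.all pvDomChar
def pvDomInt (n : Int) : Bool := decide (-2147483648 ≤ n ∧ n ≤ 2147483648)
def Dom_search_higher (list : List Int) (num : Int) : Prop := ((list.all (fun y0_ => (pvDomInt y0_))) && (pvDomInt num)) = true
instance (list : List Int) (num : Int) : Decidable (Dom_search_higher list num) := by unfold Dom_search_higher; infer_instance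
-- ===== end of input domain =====

-- B replaces A's running-best accumulator loop (which calls list.index inside the loop)
-- by a global max() followed by one first-occurrence index lookup; equivalence of the
-- RETURN value is proved on all inputs (A is total).

-- ===== PORT A =====
-- list.index(x) is ported as (index? list x).getD 0; x is always a member here, so getD is never the default.
def search_higher (list : List Int) (num : Int) : Int :=
  (list.foldl
    (fun (s : Int × Int) x =>
      if x - num > s.1 then (x - num, ((PySem.List.index? list x).getD 0 : Int)) else s)
    (0, 0)).2

-- ===== PORT B =====
-- 'if not list: return 0' → the [] branch; max(list) → PySem.List.max? (some, list nonempty);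
-- list.index(m) → (index? list m).getD 0 (m is a member, so never the default).
def search_higher_alt (list : List Int) (num : Int) : Int :=
  match list with
  | [] => 0
  | l@(_ :: _) =>
    match PySem.List.max? l (fun y => y) with
    | none => 0
    | some m => if m - num > 0 then ((PySem.List.index? l m).getD 0 : Int) else 0

-- ===== PRECONDITION & SPEC =====
def Spec_search_higher (list : List Int) (num : Int) (out : Int) : Prop := out = search_higher_alt list num
instance (list : List Int) (num : Int) (out : Int) : Decidable (Spec_search_higher list num out) := by unfold Spec_search_higher; infer_instance

-- ===== CLAIM (what is proved, stated in full; the proofs are below) =====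
def Claim_equal_search_higher : Prop := ∀ (list : List Int) (num : Int), Dom_search_higher list num → Spec_search_higher list num (search_higher list num)

-- ===== LEMMAS AND PROOFS =====

-- A's loop over any suffix l, with the index lookups taken in the full list L:
-- it returns the state updated by the max of l (ties resolved by the VALUE, so
-- the index is just the first occurrence of the max value in L).
theorem search_higher_fold_spec (L : List Int) (num : Int) :
    ∀ (l : List Int) (h b : Int),
      l.foldl
        (fun (s : Int × Int) x =>
          if x - num > s.1 then (x - num, ((PySem.List.index? L x).getD 0 : Int)) else s)
        (h, b)
      = match l with
        | [] => (h, b)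
        | x :: xs =>
          let m := xs.foldl max x
          if m - num > h then (m - num, ((PySem.List.index? L m).getD 0 : Int)) else (h, b) := by
  intro l
  induction l with
  | nil => intro h b; rfl
  | cons x xs ih =>
    intro h b
    simp only [List.foldl_cons]
    by_cases hx : x - num > h
    · rw [if_pos hx, ih]
      cases xs with
      | nil => simp [hx]
      | cons y t =>
        have hassoc : (y :: t).foldl max x = max x (t.foldl max y) := by
          simp only [List.foldl_cons]
          exact List.foldl_assoc
        simp only [hassoc]
        by_cases hm : t.foldl max y - num > x - num
        · rw [if_pos hm]
          have : max x (t.foldl max y) = t.foldl max y := by omega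
          rw [this, if_pos (by omega)]
        · rw [if_neg hm]
          have : max x (t.foldl max y) = x := by omega
          rw [this, if_pos hx]
    · rw [if_neg hx]
      rw [ih]
      cases xs with
      | nil => simp [hx]
      | cons y t =>
        have hassoc : (y :: t).foldl max x = max x (t.foldl max y) := by
          simp only [List.foldl_cons]
          exact List.foldl_assoc
        simp only [hassoc]
        by_cases hm : t.foldl max y - num > h
        · rw [if_pos hm]
          have hmx : t.foldl max y > x := by omega
          have : max x (t.foldl max y) = t.foldl max y := by omega
          rw [this, if_pos hm]
        · rw [if_neg hm]
          by_cases hxy : x ≤ t.foldl max y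
          · have : max x (t.foldl max y) = t.foldl max y := by omega
            rw [this, if_neg hm]
          · have : max x (t.foldl max y) = x := by omega
            rw [this, if_neg hx]

-- ===== VERDICT (by name: the statement is the Claim_ definition above) =====
theorem search_higher_spec : Claim_equal_search_higher := by
  intro list num _
  unfold Spec_search_higher search_higher search_higher_alt
  rw [search_higher_fold_spec]
  cases list with
  | nil => rfl
  | cons x xs =>
    simp only [PySem.List.max?_id_cons]
    split_ifs <;> rfl
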